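-- pv_equiv track=rewrite | github.com/mavdian14/Portfolio | Problem Solving/Constructive Algorithms/Bonetrousle.py | bonetrousle
-- ===== SOURCE A (Python) =====
-- def bonetrousle(n, k, b):
--     if not(b*(b+1)) <= 2*n <= b*(2*k-b+1):
--         yield -1
--         return
--     s=b*(b-1)//2
--     i=min(k,n-s)
--     while b:
--         yield i
--         n-=i
--         b-=1
--         s-=b
--         i=min(i-1,n-s)
-- ===== SOURCE B (Python) =====
-- def bonetrousle(n, k, b):
--     if not b*(b+1) <= 2*n <= b*(2*k-b+1):
--         yield -1
--         return
--     # Closed form: over the minimal descending base b..1 the surplus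
--     # r = n - b(b+1)//2 fills q = r // (k-b) elements to the ceiling k,
--     # one element gets the remainder, the rest stay at their base value.
--     r = n - b*(b+1)//2
--     c = k - b
--     q, rem = (0, 0) if c == 0 else divmod(r, c)
--     yield from range(k, k - q, -1)
--     if q < b:
--         yield b - q + rem
--         yield from range(b - q - 1, 0, -1)
-- ===== Notes on version B (the rewrite author's own statement) =====
-- stated objective: alternative
-- what changed: B replaces A's per-element greedy loop (running state s, i with i = min(i-1, n-s)) by a closed-form construction: it computes q, rem = divmod(n - b(b+1)//2, k-b) once and emits three precomputed range segments (q ceiling values k..k-q+1, one partial element b-q+rem, then the untouched base b-q-1..1).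
import Mathlib
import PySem

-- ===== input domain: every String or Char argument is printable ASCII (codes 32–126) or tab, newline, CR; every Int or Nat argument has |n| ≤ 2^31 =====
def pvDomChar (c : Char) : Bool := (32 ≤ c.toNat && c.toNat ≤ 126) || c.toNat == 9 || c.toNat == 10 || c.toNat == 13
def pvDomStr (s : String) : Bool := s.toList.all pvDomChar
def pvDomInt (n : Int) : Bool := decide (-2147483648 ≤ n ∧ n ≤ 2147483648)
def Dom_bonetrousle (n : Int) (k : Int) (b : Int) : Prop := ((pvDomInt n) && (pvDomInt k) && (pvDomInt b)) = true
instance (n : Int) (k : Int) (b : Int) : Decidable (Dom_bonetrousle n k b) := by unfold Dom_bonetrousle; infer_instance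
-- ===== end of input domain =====

-- B replaces A's per-element greedy loop by a closed-form construction: q, rem = divmod of the
-- surplus by the per-element cap k-b, then three precomputed range segments; same O(b) cost.
-- Both Pythons are generators; equivalence is about the yielded sequence (as a list).


-- ===== PORT A =====
-- A's while loop: state (n, s, i); fuel = remaining iteration count (= current b, which is
-- a nonnegative loop counter on every admitted input: Pre_ excludes b < 0 with a passing guard).
def bonetrousleLoopA : Nat → Int → Int → Int → List Int
  | 0, _, _, _ => []
  | Nat.succ f, n, s, i =>
      i :: bonetrousleLoopA f (n - i) (s - (f : Int))
             (min (i - 1) ((n - i) - (s - (f : Int))))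

def bonetrousle (n : Int) (k : Int) (b : Int) : List Int :=
  if ¬ (b * (b + 1) ≤ 2 * n ∧ 2 * n ≤ b * (2 * k - b + 1)) then [-1]
  else
    let s := PySem.Int.floordiv (b * (b - 1)) 2
    let i := min k (n - s)
    bonetrousleLoopA b.toNat n s i

-- ===== PORT B =====
-- Source B: q, rem = (0, 0) if c == 0 else divmod(r, c); then three range segments.
def bonetrousle_alt (n : Int) (k : Int) (b : Int) : List Int :=
  if ¬ (b * (b + 1) ≤ 2 * n ∧ 2 * n ≤ b * (2 * k - b + 1)) then [-1]
  else
    let r := n - PySem.Int.floordiv (b * (b + 1)) 2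
    let c := k - b
    let q := if c = 0 then 0 else PySem.Int.floordiv r c
    let rem := if c = 0 then 0 else PySem.Int.mod r c
    PySem.List.pyRange k (k - q) (-1) ++
      (if q < b then (b - q + rem) :: PySem.List.pyRange (b - q - 1) 0 (-1) else [])

-- ===== PRECONDITION & SPEC =====
-- Pre_ excludes exactly the inputs with b < 0 on which the feasibility guard passes: there A's
-- 'while b' loop never terminates (the generator diverges), so A yields no finite sequence.
def Pre_bonetrousle (n : Int) (k : Int) (b : Int) : Prop :=
  0 ≤ b ∨ ¬ (b * (b + 1) ≤ 2 * n ∧ 2 * n ≤ b * (2 * k - b + 1))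
instance (n : Int) (k : Int) (b : Int) : Decidable (Pre_bonetrousle n k b) := by
  unfold Pre_bonetrousle; infer_instance
def pvWitness_bonetrousle : Int × Int × Int := (9, 4, 3)

def Spec_bonetrousle (n : Int) (k : Int) (b : Int) (out : List Int) : Prop := out = bonetrousle_alt n k b
instance (n : Int) (k : Int) (b : Int) (out : List Int) : Decidable (Spec_bonetrousle n k b out) := by unfold Spec_bonetrousle; infer_instance

-- ===== CLAIM (what is proved, stated in full; the proofs are below) =====
def Claim_equal_bonetrousle : Prop := ∀ (n : Int) (k : Int) (b : Int), Dom_bonetrousle n k b → Pre_bonetrousle n k b → Spec_bonetrousle n k b (bonetrousle n k b)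

-- ===== LEMMAS AND PROOFS =====

-- Proof-side bridge: the greedy pass A performs, reparameterised by the constant cap c = k - b
-- and the remaining surplus r over the descending base sequence.
def greedyLoop : Nat → Int → Int → List Int
  | 0, _, _ => []
  | Nat.succ f, c, r =>
      let a := min r c
      (((f : Int) + 1) + a) :: greedyLoop f c (r - a)

-- Loop correspondence: with m iterations left, A's state is n = s + m + r, i = m + min r c.
lemma loop_eq (m : Nat) : ∀ (s r c : Int), 0 ≤ r → r ≤ (m : Int) * c → 0 ≤ c →
    bonetrousleLoopA m (s + (m : Int) + r) s ((m : Int) + min r c) = greedyLoop m c r := by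
  induction m with
  | zero => intro s r c _ _ _; rfl
  | succ f ih =>
    intro s r c hr hrc hc
    have hmin : min (min r c) (r - min r c) = min (r - min r c) c := by
      rcases le_total r c with h | h
      · rw [min_eq_left h]
        simp [min_eq_right hr, min_eq_left hc]
      · rw [min_eq_right h, min_comm]
    have hinv1 : 0 ≤ r - min r c := by
      have := min_le_left r c; omega
    have hinv2 : r - min r c ≤ (f : Int) * c := by
      rcases le_total r c with h | h
      · rw [min_eq_left h]
        simpa using mul_nonneg (Int.natCast_nonneg f) hc
      · rw [min_eq_right h]
        have hs : ((f.succ : Nat) : Int) * c = (f : Int) * c + c := by push_cast; ring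
        linarith [hrc, hs.symm.trans rfl, hs ▸ hrc]
    have hN : (s + ((f.succ : Nat) : Int) + r) - (((f.succ : Nat) : Int) + min r c)
        = (s - (f : Int)) + (f : Int) + (r - min r c) := by push_cast; ring
    have hI : min ((((f.succ : Nat) : Int) + min r c) - 1)
        (((s - (f : Int)) + (f : Int) + (r - min r c)) - (s - (f : Int)))
        = (f : Int) + min (r - min r c) c := by
      have e1 : (((f.succ : Nat) : Int) + min r c) - 1 = (f : Int) + min r c := by push_cast; ring
      have e2 : ((s - (f : Int)) + (f : Int) + (r - min r c)) - (s - (f : Int))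
          = (f : Int) + (r - min r c) := by ring
      rw [e1, e2, min_add_add_left, hmin]
    have hhead : ((f.succ : Nat) : Int) + min r c = ((f : Int) + 1) + min r c := by push_cast; ring
    calc bonetrousleLoopA f.succ (s + ((f.succ : Nat) : Int) + r) s (((f.succ : Nat) : Int) + min r c)
        = (((f.succ : Nat) : Int) + min r c) ::
            bonetrousleLoopA f ((s + ((f.succ : Nat) : Int) + r) - (((f.succ : Nat) : Int) + min r c))
              (s - (f : Int))
              (min ((((f.succ : Nat) : Int) + min r c) - 1)
                ((s + ((f.succ : Nat) : Int) + r) - (((f.succ : Nat) : Int) + min r c) - (s - (f : Int)))) := rfl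
      _ = (((f : Int) + 1) + min r c) ::
            bonetrousleLoopA f ((s - (f : Int)) + (f : Int) + (r - min r c)) (s - (f : Int))
              ((f : Int) + min (r - min r c) c) := by rw [hN, hI, hhead]
      _ = greedyLoop f.succ c r := by
            rw [ih (s - (f : Int)) (r - min r c) c hinv1 hinv2 hc]
            rfl

-- Exhausted surplus: the greedy pass emits the untouched base sequence m..1.
lemma greedy_r_zero (m : Nat) (c : Int) (hc : 0 ≤ c) :
    greedyLoop m c 0 = PySem.List.pyRange (m : Int) 0 (-1) := by
  induction m with
  | zero => rw [PySem.List.pyRange_neg_one_eq_nil (by norm_num)]; rfl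
  | succ f ih =>
    have ha : min (0 : Int) c = 0 := min_eq_left hc
    show (((f : Int) + 1) + min 0 c) :: greedyLoop f c (0 - min 0 c) = _
    rw [ha, sub_zero, ih,
        PySem.List.pyRange_neg_one_cons (show (0 : Int) < ((f + 1 : Nat) : Int) by push_cast; omega)]
    rw [show (((f + 1 : Nat) : Int)) - 1 = (f : Int) by push_cast; ring]
    rw [show ((f : Int) + 1 + 0) = (((f + 1 : Nat) : Int)) by push_cast; ring]

-- floordiv and mod of 0 by a nonzero divisor are 0.
lemma floordiv_mod_zero (c : Int) (hcne : c ≠ 0) :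
    PySem.Int.floordiv 0 c = 0 ∧ PySem.Int.mod 0 c = 0 := by
  have hm : PySem.Int.mod 0 c = 0 := (PySem.Int.mod_eq_zero_iff_dvd 0 c).mpr (dvd_zero c)
  have h := PySem.Int.floordiv_mul_add_mod 0 c
  rw [hm, add_zero] at h
  exact ⟨(mul_eq_zero.mp h).resolve_right hcne, hm⟩

-- Segment characterisation of the greedy pass for a positive cap: q full elements, one partial.
lemma greedy_segs (c : Int) (hc : 0 < c) (m : Nat) : ∀ (q rem : Int), 0 ≤ q → 0 ≤ rem → rem < c →
    q * c + rem ≤ (m : Int) * c →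
    greedyLoop m c (q * c + rem) =
      PySem.List.pyRange ((m : Int) + c) ((m : Int) + c - q) (-1) ++
        (if q < (m : Int) then ((m : Int) - q + rem) :: PySem.List.pyRange ((m : Int) - q - 1) 0 (-1)
         else []) := by
  induction m with
  | zero =>
    intro q rem hq hrem _ hle
    have hle' : q * c + rem ≤ 0 := by simpa using hle
    have hq0 : q = 0 := by
      by_contra h
      have h2 : 1 * c ≤ q * c := mul_le_mul_of_nonneg_right (by omega) hc.le
      rw [one_mul] at h2
      omega
    subst hq0
    have hrem0 : rem = 0 := by omega
    subst hrem0
    rw [PySem.List.pyRange_neg_one_eq_nil (by push_cast; omega)]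
    simp [greedyLoop]
  | succ f ih =>
    intro q rem hq hrem hremc hle
    have hle' : q * c + rem ≤ ((f : Int) + 1) * c := by push_cast at hle; linarith
    simp only [greedyLoop]
    push_cast
    rcases eq_or_lt_of_le hq with hq0 | hq1
    · -- q = 0: partial element at the head, then the untouched base sequence
      have hq0 : q = 0 := hq0.symm
      subst hq0
      have hmin : min ((0 : Int) * c + rem) c = rem := by
        rw [zero_mul, zero_add]; exact min_eq_left hremc.le
      rw [hmin, show (0 : Int) * c + rem - rem = 0 by ring, greedy_r_zero f c hc.le]
      rw [show ((f : Int) + 1) + c - 0 = ((f : Int) + 1) + c by ring]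
      rw [PySem.List.pyRange_neg_one_eq_nil (le_refl ((f : Int) + 1 + c))]
      rw [if_pos (show (0 : Int) < (f : Int) + 1 by omega)]
      rw [List.nil_append]
      rw [show ((f : Int) + 1 - 0 + rem) = (f : Int) + 1 + rem by ring]
      rw [show ((f : Int) + 1 - 0 - 1) = (f : Int) by ring]
    · -- 1 ≤ q: the head is filled to the ceiling
      have hmin : min (q * c + rem) c = c := by
        apply min_eq_right
        have h2 : 1 * c ≤ q * c := mul_le_mul_of_nonneg_right (by omega) hc.le
        rw [one_mul] at h2
        linarith
      rw [hmin, show q * c + rem - c = (q - 1) * c + rem by ring,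
          ih (q - 1) rem (by omega) hrem hremc (by linarith)]
      rw [PySem.List.pyRange_neg_one_cons (show (f : Int) + 1 + c - q < (f : Int) + 1 + c by omega)]
      rw [List.cons_append]
      rw [show ((f : Int) + 1 + c - 1) = (f : Int) + c by ring]
      rw [show ((f : Int) + 1 + c - q) = (f : Int) + c - (q - 1) by ring]
      have hcond : (q < (f : Int) + 1) = (q - 1 < (f : Int)) := propext (by constructor <;> intro h <;> omega)
      simp only [hcond]
      rw [show ((f : Int) + 1 - q + rem) = (f : Int) - (q - 1) + rem by ring]
      rw [show ((f : Int) + 1 - q - 1) = (f : Int) - (q - 1) - 1 by ring]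

-- On a passing guard with b = 0 (hence n = 0) B emits the empty sequence.
lemma alt_empty (n k b : Int) (hn : n = 0) (hb : b = 0) : bonetrousle_alt n k b = [] := by
  subst hn; subst hb
  unfold bonetrousle_alt
  rw [if_neg (not_not_intro (by constructor <;> norm_num))]
  by_cases hk : k - 0 = 0
  · have hk0 : k = 0 := by omega
    subst hk0
    decide
  · simp only [if_neg hk]
    rw [show ((0 : Int) * (0 + 1)) = 0 by ring, (floordiv_mod_zero 2 (by norm_num)).1,
        show ((0 : Int) - 0) = 0 by ring, (floordiv_mod_zero (k - 0) hk).1,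
        (floordiv_mod_zero (k - 0) hk).2]
    rw [PySem.List.pyRange_neg_one_eq_nil (by omega), if_neg (by omega : ¬ (0 : Int) < 0)]
    rfl

theorem bonetrousle_spec : Claim_equal_bonetrousle := by
  intro n k b _ hpre
  unfold Spec_bonetrousle
  by_cases hg : b * (b + 1) ≤ 2 * n ∧ 2 * n ≤ b * (2 * k - b + 1)
  · have hb : 0 ≤ b := by
      rcases hpre with h | h
      · exact h
      · exact absurd hg h
    have hA : bonetrousle n k b
        = bonetrousleLoopA b.toNat n (PySem.Int.floordiv (b * (b - 1)) 2)
            (min k (n - PySem.Int.floordiv (b * (b - 1)) 2)) := by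
      unfold bonetrousle
      rw [if_neg (not_not_intro hg)]
    rcases eq_or_lt_of_le hb with hb0 | hbpos
    · -- b = 0: the guard forces n = 0; both sides are empty
      have hb0 : b = 0 := hb0.symm
      have hn0 : n = 0 := by
        have h1 := hg.1; have h2 := hg.2
        rw [hb0] at h1 h2
        omega
      rw [alt_empty n k b hn0 hb0, hA, hb0, hn0]
      rfl
    · -- b > 0: bridge through the greedy pass, then its segment characterisation
      have hB : bonetrousle_alt n k b
          = (PySem.List.pyRange k
              (k - (if k - b = 0 then 0
                    else PySem.Int.floordiv (n - PySem.Int.floordiv (b * (b + 1)) 2) (k - b))) (-1)) ++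
            (if (if k - b = 0 then 0
                 else PySem.Int.floordiv (n - PySem.Int.floordiv (b * (b + 1)) 2) (k - b)) < b then
               (b - (if k - b = 0 then 0
                     else PySem.Int.floordiv (n - PySem.Int.floordiv (b * (b + 1)) 2) (k - b))
                  + (if k - b = 0 then 0
                     else PySem.Int.mod (n - PySem.Int.floordiv (b * (b + 1)) 2) (k - b))) ::
               PySem.List.pyRange
                 (b - (if k - b = 0 then 0
                       else PySem.Int.floordiv (n - PySem.Int.floordiv (b * (b + 1)) 2) (k - b)) - 1)
                 0 (-1)
             else []) := by
        unfold bonetrousle_alt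
        rw [if_neg (not_not_intro hg)]
      rw [hA, hB]
      set s := PySem.Int.floordiv (b * (b - 1)) 2 with hsdef
      set t := PySem.Int.floordiv (b * (b + 1)) 2 with htdef
      set r := n - t with hrdef
      set c := k - b with hcdef
      have hdvd1 : (2 : Int) ∣ b * (b - 1) := by
        have h := Int.even_mul_succ_self (b - 1)
        have e : (b - 1) * (b - 1 + 1) = b * (b - 1) := by ring
        exact (e ▸ h).two_dvd
      have hdvd2 : (2 : Int) ∣ b * (b + 1) := (Int.even_mul_succ_self b).two_dvd
      have hs2 : s * 2 = b * (b - 1) := by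
        have hm := (PySem.Int.mod_eq_zero_iff_dvd (b * (b - 1)) 2).mpr hdvd1
        have h := PySem.Int.floordiv_mul_add_mod (b * (b - 1)) 2
        rw [hm] at h; simpa [hsdef] using h
      have ht2 : t * 2 = b * (b + 1) := by
        have hm := (PySem.Int.mod_eq_zero_iff_dvd (b * (b + 1)) 2).mpr hdvd2
        have h := PySem.Int.floordiv_mul_add_mod (b * (b + 1)) 2
        rw [hm] at h; simpa [htdef] using h
      have hr0 : 0 ≤ r := by have := hg.1; omega
      have hrb : r ≤ b * c := by
        have h2 := hg.2
        have e : b * (2 * k - b + 1) - b * (b + 1) = 2 * (b * c) := by rw [hcdef]; ring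
        omega
      have hc : 0 ≤ c := by
        rcases le_or_gt 0 c with h | h
        · exact h
        · have : b * c < 0 := mul_neg_of_pos_of_neg hbpos h
          omega
      have hbm : ((b.toNat : Int)) = b := Int.toNat_of_nonneg hb
      have hts : b * (b + 1) = b * (b - 1) + 2 * b := by ring
      have hn : s + b + r = n := by omega
      have hi : min k (n - s) = b + min r c := by
        have hns : n - s = b + r := by omega
        have hk : k = b + c := by rw [hcdef]; ring
        rw [hns, hk, min_add_add_left, min_comm]
      have keyA := loop_eq b.toNat s r c hr0 (by rw [hbm]; exact hrb) hc
      rw [hbm, hn, ← hi] at keyA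
      rw [keyA]
      rcases eq_or_lt_of_le hc with hc0 | hcpos
      · -- cap is zero: the surplus is zero, both sides are the base sequence b..1
        have hc0 : c = 0 := hc0.symm
        have hr00 : r = 0 := by rw [hc0] at hrb; omega
        rw [hr00, greedy_r_zero b.toNat c hc, hbm]
        simp only [if_pos hc0]
        rw [sub_zero, PySem.List.pyRange_neg_one_eq_nil (le_refl k), List.nil_append,
            if_pos hbpos, PySem.List.pyRange_neg_one_cons hbpos]
        norm_num
      · -- positive cap: divmod decomposition r = q * c + rem
        have hcne : ¬ c = 0 := by omega
        simp only [if_neg hcne]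
        set q := PySem.Int.floordiv r c with hqdef
        set rem := PySem.Int.mod r c with hremdef
        have hqc : q * c + rem = r := PySem.Int.floordiv_mul_add_mod r c
        have hrem0 : 0 ≤ rem := PySem.Int.mod_nonneg r hcpos
        have hremc : rem < c := PySem.Int.mod_lt r hcpos
        have hq0 : 0 ≤ q := by
          by_contra h
          have hql : q ≤ -1 := by omega
          have h2 : q * c ≤ -1 * c := mul_le_mul_of_nonneg_right hql hcpos.le
          rw [neg_one_mul] at h2
          omega
        have key := greedy_segs c hcpos b.toNat q rem hq0 hrem0 hremc
          (by rw [hbm, hqc]; exact hrb)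
        rw [hqc, hbm] at key
        rw [key, show b + c = k by rw [hcdef]; ring]
  · unfold bonetrousle bonetrousle_alt
    rw [if_pos hg, if_pos hg]
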